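-- pv_equiv track=rewrite | github.com/Derkune/Newspeak | newspeak.py | find_char_backwards
-- ===== SOURCE A (Python) =====
-- def find_char_backwards(in_str: str, starting_from_idx: int, ch: str):
--     starting_from_idx = min(starting_from_idx, len(in_str) - 1)
--
--     while starting_from_idx >= 0:
--         ch_in_str: str = in_str[starting_from_idx]
--         if ch_in_str == ch:
--             return starting_from_idx
--         starting_from_idx -= 1
--
--     return 0
-- ===== SOURCE B (Python) =====
-- def find_char_backwards(in_str: str, starting_from_idx: int, ch: str):
--     end = min(starting_from_idx, len(in_str) - 1) + 1
--     result = 0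
--     for idx in range(end):
--         if in_str[idx] == ch:
--             result = idx
--     return result
-- ===== Notes on version B (the rewrite author's own statement) =====
-- stated objective: alternative
-- what changed: Replaces the backward while-loop with early return by a single forward for-loop over range(0, end) that keeps the last matching index in an accumulator (default 0).
import Mathlib
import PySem

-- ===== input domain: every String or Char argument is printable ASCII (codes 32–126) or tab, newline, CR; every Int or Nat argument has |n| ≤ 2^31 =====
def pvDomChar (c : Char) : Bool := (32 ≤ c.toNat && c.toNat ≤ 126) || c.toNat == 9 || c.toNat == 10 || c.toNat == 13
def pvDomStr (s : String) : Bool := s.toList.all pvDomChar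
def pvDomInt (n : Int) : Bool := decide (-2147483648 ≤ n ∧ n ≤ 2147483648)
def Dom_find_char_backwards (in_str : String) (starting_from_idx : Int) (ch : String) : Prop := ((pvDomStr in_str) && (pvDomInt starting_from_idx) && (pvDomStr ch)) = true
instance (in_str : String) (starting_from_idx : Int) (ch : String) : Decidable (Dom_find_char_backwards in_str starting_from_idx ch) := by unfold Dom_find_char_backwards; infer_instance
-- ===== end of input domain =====

-- B replaces A's backward scan with an early return by a forward fold over range(end) keeping the last matching index (alternative decomposition, same cost).


-- ===== PORT A =====
-- backward while-loop of A on a nonnegative index (index is always in range, so the single-char string in_str[i] is [s.getD i ' ']; the default is never read)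
def fcbLoopA (s ch : List Char) (i : Nat) : Int :=
  if [s.getD i ' '] = ch then (i : Int)
  else match i with
    | 0 => 0
    | n + 1 => fcbLoopA s ch n

def find_char_backwards (in_str : String) (starting_from_idx : Int) (ch : String) : Int :=
  let s := in_str.toList
  let start := min starting_from_idx ((s.length : Int) - 1)
  if start < 0 then 0 else fcbLoopA s ch.toList start.toNat

-- ===== PORT B =====
def find_char_backwards_alt (in_str : String) (starting_from_idx : Int) (ch : String) : Int :=
  let s := in_str.toList
  let e := min starting_from_idx ((s.length : Int) - 1) + 1
  (List.range e.toNat).foldl (fun res idx => if [s.getD idx ' '] = ch.toList then (idx : Int) else res) 0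

-- ===== PRECONDITION & SPEC =====
def Spec_find_char_backwards (in_str : String) (starting_from_idx : Int) (ch : String) (out : Int) : Prop := out = find_char_backwards_alt in_str starting_from_idx ch
instance (in_str : String) (starting_from_idx : Int) (ch : String) (out : Int) : Decidable (Spec_find_char_backwards in_str starting_from_idx ch out) := by unfold Spec_find_char_backwards; infer_instance

-- ===== CLAIM (what is proved, stated in full; the proofs are below) =====
def Claim_equal_find_char_backwards : Prop := ∀ (in_str : String) (starting_from_idx : Int) (ch : String), Dom_find_char_backwards in_str starting_from_idx ch → Spec_find_char_backwards in_str starting_from_idx ch (find_char_backwards in_str starting_from_idx ch)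

-- ===== LEMMAS AND PROOFS =====
theorem fcbLoopA_eq_foldl (s ch : List Char) (i : Nat) :
    fcbLoopA s ch i =
      (List.range (i + 1)).foldl (fun res idx => if [s.getD idx ' '] = ch then (idx : Int) else res) 0 := by
  induction i with
  | zero =>
      simp [fcbLoopA, List.range_succ]
  | succ n ih =>
      rw [List.range_succ, List.foldl_append, fcbLoopA]
      simp only [List.foldl]
      split_ifs with h
      · push_cast; ring
      · exact ih

-- ===== VERDICT (by name: the statement is the Claim_ definition above) =====
theorem find_char_backwards_spec : Claim_equal_find_char_backwards := by
  intro in_str start ch _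
  unfold Spec_find_char_backwards find_char_backwards find_char_backwards_alt
  simp only []
  set s := in_str.toList
  set m := min start ((s.length : Int) - 1) with hm
  by_cases h : m < 0
  · have : (m + 1).toNat = 0 := by omega
    simp [h, this]
  · have h0 : 0 ≤ m := by omega
    have hn : (m + 1).toNat = m.toNat + 1 := by omega
    simp [h, hn, fcbLoopA_eq_foldl]
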